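-- pv_equiv track=rewrite | github.com/tbnorth/shaa2tn | shaa2tn.py | strike_through
-- ===== SOURCE A (Python) =====
-- def strike_through(text):
--     """Replace ~~foo~~ with <s>foo</s> to support strike-through in output"""
--     text = text.split('\n')
--     for line_i, line in enumerate(text):
--         if '~~' not in line:
--             continue
--         line = line.split('~~')
--         parts = []
--         for part_i, part in enumerate(line):
--             if part_i % 2 == 0:
--                 parts.append(part)
--             else:
--                 parts.append("<s>%s</s>" % part)
--         text[line_i] = ''.join(parts)
--     return '\n'.join(text)
-- ===== SOURCE B (Python) =====
-- def strike_through(text):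
--     """Replace ~~foo~~ with <s>foo</s> to support strike-through in output"""
--     out = []
--     for line in text.split('\n'):
--         buf = []
--         open_ = False
--         i = 0
--         n = len(line)
--         while i < n:
--             if line.startswith('~~', i):
--                 buf.append('</s>' if open_ else '<s>')
--                 open_ = not open_
--                 i += 2
--             else:
--                 buf.append(line[i])
--                 i += 1
--         if open_:
--             buf.append('</s>')
--         out.append(''.join(buf))
--     return '\n'.join(out)
-- ===== Notes on version B (the rewrite author's own statement) =====
-- stated objective: alternative
-- what changed: Replaces A's split-each-line-on-'~~'-then-wrap-odd-indexed-parts-and-rejoin reconstruction with a single streaming pass per line that copies characters and toggles an open/close tag state on each '~~', closing an open tag at end of line.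
import Mathlib
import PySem

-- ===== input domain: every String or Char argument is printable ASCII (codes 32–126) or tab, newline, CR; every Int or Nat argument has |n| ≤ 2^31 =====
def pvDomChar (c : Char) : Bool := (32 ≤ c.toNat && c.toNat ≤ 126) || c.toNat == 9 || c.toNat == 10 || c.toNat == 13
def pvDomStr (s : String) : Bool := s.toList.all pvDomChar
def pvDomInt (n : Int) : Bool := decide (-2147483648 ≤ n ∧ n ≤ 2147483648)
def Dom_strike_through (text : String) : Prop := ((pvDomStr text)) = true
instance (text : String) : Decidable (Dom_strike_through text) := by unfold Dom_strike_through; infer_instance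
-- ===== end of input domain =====

-- B replaces A's split-on-'~~'/wrap-odd-indexed-parts reconstruction with a one-pass
-- streaming toggle over each line (objective: alternative decomposition, same cost).

-- ===== PORT A =====
-- A's loop body for one line: if '~~' not in line leave it ('continue'), else
-- split on '~~', wrap odd-indexed parts in <s>…</s>, join.
def pvProcLineA (line : List Char) : List Char :=
  if PySem.Chars.isIn "~~".toList line then
    PySem.Chars.join []
      ((PySem.List.enumerate (PySem.Chars.splitOn line "~~".toList)).foldl
        (fun acc pi =>
          acc ++ [if PySem.Int.mod pi.1 2 = 0 then pi.2
                  else "<s>".toList ++ pi.2 ++ "</s>".toList]) [])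
  else line

def strike_through (text : String) : String :=
  String.ofList
    (PySem.Chars.join ['\n']
      ((PySem.Chars.splitOn text.toList ['\n']).map pvProcLineA))

-- ===== PORT B =====
-- B's while-loop over one line: copy chars; on '~~' emit '<s>'/'</s>' and flip the
-- flag, advancing by 2; after the loop close an open tag.
def pvScanB : List Char → Bool → List Char
  | [], b => if b then "</s>".toList else []
  | c :: rest, b =>
    if PySem.Chars.startswith (c :: rest) "~~".toList then
      (if b then "</s>".toList else "<s>".toList) ++ pvScanB ((c :: rest).drop 2) (!b)
    else c :: pvScanB rest b
termination_by l _ => l.length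
decreasing_by all_goals simp

def strike_through_alt (text : String) : String :=
  String.ofList
    (PySem.Chars.join ['\n']
      ((PySem.Chars.splitOn text.toList ['\n']).map (fun l => pvScanB l false)))

-- ===== PRECONDITION & SPEC =====
def Spec_strike_through (text : String) (out : String) : Prop := out = strike_through_alt text
instance (text : String) (out : String) : Decidable (Spec_strike_through text out) := by unfold Spec_strike_through; infer_instance

-- ===== CLAIM (what is proved, stated in full; the proofs are below) =====
def Claim_equal_strike_through : Prop := ∀ (text : String), Dom_strike_through text → Spec_strike_through text (strike_through text)

-- ===== LEMMAS AND PROOFS =====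

-- Structural recursion computing splitOn on '~~' (proof-side model of A's split).
def pvSms : List Char → List (List Char)
  | [] => [[]]
  | c :: rest =>
    if ("~~".toList).isPrefixOf (c :: rest) then
      [] :: pvSms ((c :: rest).drop 2)
    else (pvSms rest).modifyHead (c :: ·)
termination_by l => l.length
decreasing_by all_goals simp

-- The common alternating glue: concatenate parts, a tag at each boundary, flag b =
-- 'a <s> is open'.
def pvGlue : Bool → List (List Char) → List Char
  | b, [] => if b then "</s>".toList else []
  | b, [p] => p ++ (if b then "</s>".toList else [])
  | b, p :: q :: ps => p ++ (if b then "</s>".toList else "<s>".toList) ++ pvGlue (!b) (q :: ps)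

theorem pvSms_ne_nil (l : List Char) : pvSms l ≠ [] := by
  induction l using pvSms.induct with
  | case1 => simp [pvSms]
  | case2 c rest h ih => rw [pvSms, if_pos h]; simp
  | case3 c rest h ih =>
    rw [pvSms, if_neg h]
    cases hq : pvSms rest with
    | nil => exact absurd hq ih
    | cons p ps => simp

theorem pv_go_spec (fuel : Nat) (l cur : List Char) (acc : List (List Char))
    (h : l.length ≤ fuel) :
    PySem.Chars.splitOn.go "~~".toList fuel l cur acc =
      acc.reverse ++ (pvSms l).modifyHead (cur.reverse ++ ·) := by
  induction fuel generalizing l cur acc with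
  | zero =>
    have : l = [] := by cases l <;> simp_all
    subst this
    rw [PySem.Chars.splitOn.go]; simp [pvSms]
  | succ fuel ih =>
    cases l with
    | nil => rw [PySem.Chars.splitOn.go]; simp [pvSms]; omega
    | cons c rest =>
      rw [PySem.Chars.splitOn.go]
      by_cases hp : ("~~".toList).isPrefixOf (c :: rest)
      · rw [if_pos hp]
        rw [ih ((c :: rest).drop "~~".toList.length) [] (cur.reverse :: acc)
            (by simp at h ⊢; omega)]
        rw [pvSms, if_pos hp]
        obtain ⟨p, ps, hps⟩ : ∃ p ps, pvSms ((c :: rest).drop 2) = p :: ps := by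
          cases hq : pvSms ((c :: rest).drop 2) with
          | nil => exact absurd hq (pvSms_ne_nil _)
          | cons p ps => exact ⟨p, ps, rfl⟩
        simp only [List.drop_succ_cons, List.drop_one] at hps
        simp [hps]
      · rw [if_neg hp]
        rw [ih rest (c :: cur) acc (by simp at h ⊢; omega)]
        rw [pvSms, if_neg hp]
        obtain ⟨p, ps, hps⟩ : ∃ p ps, pvSms rest = p :: ps := by
          cases hq : pvSms rest with
          | nil => exact absurd hq (pvSms_ne_nil _)
          | cons p ps => exact ⟨p, ps, rfl⟩
        simp [hps]

theorem pv_splitOn_eq_sms (l : List Char) :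
    PySem.Chars.splitOn l "~~".toList = pvSms l := by
  rw [PySem.Chars.splitOn, pv_go_spec _ _ _ _ (by omega)]
  obtain ⟨p, ps, hps⟩ : ∃ p ps, pvSms l = p :: ps := by
    cases hq : pvSms l with
    | nil => exact absurd hq (pvSms_ne_nil _)
    | cons p ps => exact ⟨p, ps, rfl⟩
  simp [hps]

-- B's scan is the glue of the split parts.
theorem pv_scan_eq_glue (n : Nat) : ∀ (l : List Char), l.length ≤ n → ∀ (b : Bool),
    pvScanB l b = pvGlue b (pvSms l) := by
  induction n with
  | zero =>
    intro l hl b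
    have : l = [] := by cases l <;> simp_all
    subst this
    rw [pvScanB, pvSms]; rfl
  | succ n ih =>
    intro l hl b
    cases l with
    | nil => rw [pvScanB, pvSms]; rfl
    | cons c rest =>
      rw [pvScanB, pvSms]
      by_cases hp : ("~~".toList).isPrefixOf (c :: rest)
      · rw [if_pos (by simpa [PySem.Chars.startswith] using hp), if_pos hp]
        rw [ih ((c :: rest).drop 2) (by simp at hl ⊢; omega) (!b)]
        obtain ⟨p, ps, hps⟩ : ∃ p ps, pvSms ((c :: rest).drop 2) = p :: ps := by
          cases hq : pvSms ((c :: rest).drop 2) with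
          | nil => exact absurd hq (pvSms_ne_nil _)
          | cons p ps => exact ⟨p, ps, rfl⟩
        rw [hps]; simp [pvGlue]
      · rw [if_neg (by simpa [PySem.Chars.startswith] using hp), if_neg hp]
        rw [ih rest (by simp at hl ⊢; omega) b]
        obtain ⟨p, ps, hps⟩ : ∃ p ps, pvSms rest = p :: ps := by
          cases hq : pvSms rest with
          | nil => exact absurd hq (pvSms_ne_nil _)
          | cons p ps => exact ⟨p, ps, rfl⟩
        rw [hps]
        cases ps <;> simp [pvGlue, List.modifyHead]

theorem pv_join_nil_flatten (ps : List (List Char)) :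
    PySem.Chars.join [] ps = ps.flatten := by
  rw [PySem.Chars.join, List.intercalate]
  induction ps with
  | nil => simp
  | cons p ps ih => cases ps <;> simp_all

theorem pv_mod_two (i : Int) : PySem.Int.mod i 2 = i % 2 :=
  PySem.Int.mod_eq_emod_of_pos (by omega)

-- A's wrap-odd-indices flatten equals the glue, for any starting index.
theorem pv_wrap_eq_glue : ∀ (ps : List (List Char)), ps ≠ [] → ∀ (i : Int),
    (List.map (fun pi : Int × List Char =>
        if PySem.Int.mod pi.1 2 = 0 then pi.2
        else "<s>".toList ++ pi.2 ++ "</s>".toList) (PySem.List.enumerate ps i)).flatten =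
      if i % 2 = 0 then pvGlue false ps else "<s>".toList ++ pvGlue true ps := by
  intro ps
  induction ps with
  | nil => simp
  | cons p ps ih =>
    intro _ i
    cases ps with
    | nil =>
      rcases Int.emod_two_eq i with h | h <;>
        simp [PySem.List.enumerate, pvGlue, h]
      
    | cons q ps =>
      have hmod : (i + 1) % 2 = (if i % 2 = 0 then (1 : Int) else 0) := by
        rcases Int.emod_two_eq i with h | h <;> simp [h] <;> omega
      rw [PySem.List.enumerate]
      rw [List.map_cons, List.flatten_cons, ih (by simp) (i + 1), hmod, pv_mod_two]
      rcases Int.emod_two_eq i with h | h <;> simp [h, pvGlue]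

-- A line without '~~' splits into itself.
theorem pv_sms_no_sep : ∀ (n : Nat) (l : List Char), l.length ≤ n →
    (∀ j, ¬ ("~~".toList) <+: l.drop j) → pvSms l = [l] := by
  intro n
  induction n with
  | zero =>
    intro l hl _
    have : l = [] := by cases l <;> simp_all
    subst this; rw [pvSms]
  | succ n ih =>
    intro l hl h
    cases l with
    | nil => rw [pvSms]
    | cons c rest =>
      rw [pvSms, if_neg (by
        intro hp
        exact h 0 (by simpa using (List.isPrefixOf_iff_prefix.mp hp)))]
      rw [ih rest (by simp at hl ⊢; omega) (fun j => by simpa using h (j + 1))]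
      rfl

-- Per line, A's branch-free value equals B's scan.
theorem pv_line_eq (l : List Char) : pvProcLineA l = pvScanB l false := by
  rw [pvProcLineA, pv_scan_eq_glue l.length l (le_refl _) false]
  by_cases hin : PySem.Chars.isIn "~~".toList l = true
  · rw [if_pos hin]
    rw [PySem.List.foldl_append_singleton_eq_map, pv_join_nil_flatten,
      pv_splitOn_eq_sms, List.nil_append]
    rw [pv_wrap_eq_glue (pvSms l) (pvSms_ne_nil l) 0]
    simp
  · rw [if_neg hin]
    have hnot : ∀ j, ¬ ("~~".toList) <+: l.drop j := by
      intro j hp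
      exact absurd ((PySem.Chars.exists_prefix_drop_iff_isIn _ _).mp ⟨j, hp⟩) hin
    rw [pv_sms_no_sep l.length l (le_refl _) hnot]
    simp [pvGlue]

-- ===== VERDICT (by name: the statement is the Claim_ definition above) =====
theorem strike_through_spec : Claim_equal_strike_through := by
  intro text _
  unfold Spec_strike_through strike_through strike_through_alt
  congr 2
  exact List.map_congr_left (fun l _ => pv_line_eq l)
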